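-- pv_equiv track=rewrite | github.com/FlamingOctopus/python-learn-guide | python_course/python_course_answers/module_1_8/10_the_truth/main.py | create_strings
-- ===== SOURCE A (Python) =====
-- def create_strings(string):
--     strings = string.split()
--     list_words = []
--     string = ""
--     for word in strings:
--         if not '/' in word:
--             string += word + " "
--         else:
--             string += word
--             list_words.append(string)
--             string = ""
--     return list_words
-- ===== SOURCE B (Python) =====
-- def create_strings(string):
--     words = string.split()
--     bounds = [i for i, w in enumerate(words) if '/' in w]
--     result = []
--     start = 0
--     for b in bounds:
--         result.append(' '.join(words[start:b + 1]))
--         start = b + 1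
--     return result
-- ===== Notes on version B (the rewrite author's own statement) =====
-- stated objective: alternative
-- what changed: Replaces A's single pass with a mutable string buffer by two passes: first an index table of the slash-containing boundary words, then slicing the word list between consecutive boundaries and joining each slice; trailing words after the last boundary fall out naturally.
import Mathlib
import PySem

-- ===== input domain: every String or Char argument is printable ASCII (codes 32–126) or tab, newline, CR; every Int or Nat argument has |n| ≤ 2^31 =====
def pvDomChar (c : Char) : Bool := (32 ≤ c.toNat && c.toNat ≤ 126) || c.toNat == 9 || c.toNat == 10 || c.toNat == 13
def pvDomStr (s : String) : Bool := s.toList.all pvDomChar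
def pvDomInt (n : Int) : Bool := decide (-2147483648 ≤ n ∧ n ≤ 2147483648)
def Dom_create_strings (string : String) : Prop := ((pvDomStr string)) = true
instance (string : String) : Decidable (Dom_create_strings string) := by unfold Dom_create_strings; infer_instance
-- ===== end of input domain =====

-- B rebuilds the groups by a two-pass index-table-and-slice decomposition instead of A's
-- running string buffer; same cost, alternative structure.

-- ===== PORT A =====
-- A's loop: one pass; the accumulated Python str is represented as a List Char
-- (appended with ++, turned into a String exactly when A appends it to the result list).
def create_strings_stepA (st : List String × List Char) (word : String) : List String × List Char :=
  if !(PySem.Str.isIn "/" word) then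
    (st.1, st.2 ++ word.toList ++ [' '])
  else
    (st.1 ++ [String.ofList (st.2 ++ word.toList)], [])

def create_strings (string : String) : List String :=
  let strings := PySem.Str.split₀ string
  ((strings.foldl create_strings_stepA ([], [])).1)

-- ===== PORT B =====
-- B's two passes: the boundary-index table, then a fold over it slicing words[start:b+1].
def create_strings_alt (string : String) : List String :=
  let words := PySem.Str.split₀ string
  let bounds := ((PySem.List.enumerate words).filter (fun p => PySem.Str.isIn "/" p.2)).map (·.1)
  (bounds.foldl
    (fun (st : List String × Int) b =>
      (st.1 ++ [PySem.Str.join " " (PySem.List.slice words (some st.2) (some (b + 1)))], b + 1))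
    ([], 0)).1

-- ===== PRECONDITION & SPEC =====
def Spec_create_strings (string : String) (out : List String) : Prop := out = create_strings_alt string
instance (string : String) (out : List String) : Decidable (Spec_create_strings string out) := by unfold Spec_create_strings; infer_instance

-- ===== CLAIM (what is proved, stated in full; the proofs are below) =====
def Claim_equal_create_strings : Prop := ∀ (string : String), Dom_create_strings string → Spec_create_strings string (create_strings string)

-- ===== LEMMAS AND PROOFS =====

-- recursive form of A's loop (output produced after accumulator state `acc`)
def aresGroups (acc : List Char) : List String → List String
  | [] => []
  | w :: ws =>
      if PySem.Str.isIn "/" w then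
        String.ofList (acc ++ w.toList) :: aresGroups [] ws
      else
        aresGroups (acc ++ w.toList ++ [' ']) ws

-- recursive form of B's second pass (run of the fold over the bounds)
def loopB (words : List String) : List Int → Int → List String
  | [], _ => []
  | b :: bs, s =>
      PySem.Str.join " " (PySem.List.slice words (some s) (some (b + 1))) :: loopB words bs (b + 1)

-- B's first pass, with the enumeration start as a parameter
def boundsFrom (ws : List String) (s : Int) : List Int :=
  ((PySem.List.enumerate ws s).filter (fun p => PySem.Str.isIn "/" p.2)).map (·.1)

theorem foldA_eq (ws : List String) (out : List String) (acc : List Char) :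
    (ws.foldl create_strings_stepA (out, acc)).1 = out ++ aresGroups acc ws := by
  induction ws generalizing out acc with
  | nil => simp [aresGroups]
  | cons w ws ih =>
      cases hb : PySem.Str.isIn "/" w <;>
      simp_all [create_strings_stepA, aresGroups]

theorem foldB_eq (words : List String) (bs : List Int) (out : List String) (s : Int) :
    (bs.foldl
      (fun (st : List String × Int) b =>
        (st.1 ++ [PySem.Str.join " " (PySem.List.slice words (some st.2) (some (b + 1)))], b + 1))
      (out, s)).1 = out ++ loopB words bs s := by
  induction bs generalizing out s with
  | nil => simp [loopB]
  | cons b bs ih => simp [loopB, ih]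

theorem boundsFrom_nil (s : Int) : boundsFrom [] s = [] := by
  simp [boundsFrom, PySem.List.enumerate]

theorem boundsFrom_cons (w : String) (ws : List String) (s : Int) :
    boundsFrom (w :: ws) s =
      if PySem.Str.isIn "/" w then s :: boundsFrom ws (s + 1) else boundsFrom ws (s + 1) := by
  cases hb : PySem.Str.isIn "/" w <;>
  simp_all [boundsFrom, PySem.List.enumerate_cons]

theorem boundsFrom_shift (ws : List String) (s : Int) :
    boundsFrom ws (s + 1) = (boundsFrom ws s).map (· + 1) := by
  induction ws generalizing s with
  | nil => simp [boundsFrom_nil]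
  | cons w ws ih =>
      rw [boundsFrom_cons, boundsFrom_cons]
      by_cases h : PySem.Str.isIn "/" w
      · rw [if_pos h, if_pos h, ih (s + 1)]
        simp
      · rw [if_neg h, if_neg h, ih (s + 1)]

theorem boundsFrom_bounds (ws : List String) (s : Int) :
    ∀ b ∈ boundsFrom ws s, s ≤ b ∧ b < s + ws.length := by
  induction ws generalizing s with
  | nil => simp [boundsFrom_nil]
  | cons w ws ih =>
      intro b hb
      rw [boundsFrom_cons] at hb
      by_cases h : PySem.Str.isIn "/" w
      · rw [if_pos h] at hb
        rcases List.mem_cons.mp hb with rfl | hb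
        · constructor <;> simp
        · have := ih (s + 1) b hb; simp at *; omega
      · rw [if_neg h] at hb
        have := ih (s + 1) b hb; simp at *; omega

-- cons-shift of loopB: a fully shifted run over w :: ws is the unshifted run over ws
theorem loopB_shift (ws : List String) (w : String) (bs : List Int) (s : Int)
    (hbs : ∀ b ∈ bs, 0 ≤ b) (hs : 0 ≤ s) :
    loopB (w :: ws) (bs.map (· + 1)) (s + 1) = loopB ws bs s := by
  induction bs generalizing s with
  | nil => simp [loopB]
  | cons b bs ih =>
      have hb : (0:Int) ≤ b := hbs b (by simp)
      have h1 : PySem.List.slice (w :: ws) (some (s + 1)) (some (b + 1 + 1)) =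
          PySem.List.slice ws (some s) (some (b + 1)) := by
        rw [PySem.List.slice_toNat _ (by omega) (by omega),
            PySem.List.slice_toNat _ hs (by omega)]
        have e1 : (s + 1).toNat = s.toNat + 1 := by omega
        have e2 : (b + 1 + 1).toNat = (b + 1).toNat + 1 := by omega
        rw [e1, e2]
        simp only [List.drop_succ_cons]
        congr 1
        omega
      simp only [List.map_cons, loopB, h1]
      congr 1
      exact ih (b + 1) (fun x hx => by have := hbs x (List.mem_cons_of_mem _ hx); omega) (by omega)

-- how A's pending accumulator enters the first group of the remaining output
def consAcc (acc : List Char) : List String → List String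
  | [] => []
  | g :: gs => String.ofList (acc ++ g.toList) :: gs

theorem consAcc_nilAcc (l : List String) : consAcc [] l = l := by
  cases l with
  | nil => rfl
  | cons g gs => simp [consAcc, String.ofList_toList]

theorem main_eq (ws : List String) (acc : List Char) :
    aresGroups acc ws = consAcc acc (loopB ws (boundsFrom ws 0) 0) := by
  induction ws generalizing acc with
  | nil => simp [aresGroups, boundsFrom_nil, loopB, consAcc]
  | cons w ws ih =>
      have hnn : ∀ b ∈ boundsFrom ws 0, (0:Int) ≤ b ∧ b < (ws.length : Int) := by
        intro b hb
        have := boundsFrom_bounds ws 0 b hb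
        omega
      rw [boundsFrom_cons, show (0:Int) + 1 = 0 + 1 from rfl, boundsFrom_shift]
      by_cases h : PySem.Str.isIn "/" w
      · -- boundary word: it closes the pending group with itself as last word
        rw [if_pos h]
        have hhead : PySem.List.slice (w :: ws) (some 0) (some ((0:Int) + 1)) = [w] := by
          rw [PySem.List.slice_toNat _ (by omega) (by omega)]
          simp
        have htail : loopB (w :: ws) ((boundsFrom ws 0).map (· + 1)) (0 + 1) =
            loopB ws (boundsFrom ws 0) 0 :=
          loopB_shift ws w _ 0 (fun b hb => (hnn b hb).1) (by omega)
        simp only [loopB, hhead, htail]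
        simp only [aresGroups, h, if_pos]
        rw [ih []]
        rw [consAcc_nilAcc]
        simp [consAcc, PySem.Str.join, PySem.Chars.join_singleton, String.ofList_toList]
      · -- non-boundary word: it is prepended (with a space) to the next group, if any
        rw [if_neg h]
        simp only [aresGroups, h, if_neg, Bool.not_eq_true]
        rw [ih (acc ++ w.toList ++ [' '])]
        cases hbs : boundsFrom ws 0 with
        | nil => simp [loopB, consAcc]
        | cons b bs =>
            have hb0 : (0:Int) ≤ b := (hnn b (by rw [hbs]; simp)).1
            have hblt : b < (ws.length : Int) := (hnn b (by rw [hbs]; simp)).2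
            have hwsne : ws ≠ [] := by
              intro he; rw [he] at hblt; simp at hblt; omega
            have hhead : PySem.List.slice (w :: ws) (some 0) (some (b + 1 + 1)) =
                w :: List.take (b + 1).toNat ws := by
              rw [PySem.List.slice_toNat _ (by omega) (by omega)]
              have e2 : (b + 1 + 1).toNat = (b + 1).toNat + 1 := by omega
              simp [e2]
            have hhead' : PySem.List.slice ws (some 0) (some (b + 1)) =
                List.take (b + 1).toNat ws := by
              rw [PySem.List.slice_toNat _ (by omega) (by omega)]
              simp
            have htake : List.take (b + 1).toNat ws ≠ [] := by
              cases ws with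
              | nil => exact absurd rfl hwsne
              | cons x xs =>
                  have : (b + 1).toNat = (b.toNat) + 1 := by omega
                  simp [this]
            have htail : loopB (w :: ws) (bs.map (· + 1)) (b + 1 + 1) =
                loopB ws bs (b + 1) :=
              loopB_shift ws w bs (b + 1)
                (fun x hx => by
                  have := (hnn x (by rw [hbs]; exact List.mem_cons_of_mem _ hx)).1; omega)
                (by omega)
            simp only [List.map_cons, loopB, hhead, hhead', htail, consAcc]
            -- heads: ' '.join(w :: g) = w ++ " " ++ ' '.join(g) for nonempty g
            obtain ⟨x, xs, hx⟩ := List.exists_cons_of_ne_nil htake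
            rw [hx]
            simp [PySem.Str.join, PySem.Chars.join_cons_cons, String.toList_ofList]

theorem ports_eq (s : String) : create_strings s = create_strings_alt s := by
  unfold create_strings create_strings_alt
  rw [foldA_eq, foldB_eq]
  simp only [List.nil_append]
  rw [main_eq, consAcc_nilAcc]
  rfl

-- ===== VERDICT (by name: the statement is the Claim_ definition above) =====
theorem create_strings_spec : Claim_equal_create_strings := by
  intro s _
  unfold Spec_create_strings
  exact ports_eq s
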